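-- pv_equiv track=rewrite | github.com/McQuaidRobotics/ScoutingPASS | scripts/BetterCSVParser.py | calcAmpedVsUnampedExact
-- ===== SOURCE A (Python) =====
-- def calcAmpedVsUnampedExact(totalCycles: int, speakerScore: int, climbing: int) -> list[int]:
--     for harmony in range(climbing + 1):
--         harmony_points = 0 if harmony == 0 else (harmony - 1) * 2
--         for unamped in range(totalCycles + 1):
--             amped = totalCycles - unamped
--             if unamped * 2 + amped * 5 + harmony_points == speakerScore:
--                 return [unamped * 2, amped * 5, harmony_points]
--     return None
-- ===== SOURCE B (Python) =====
-- def calcAmpedVsUnampedExact(totalCycles: int, speakerScore: int, climbing: int) -> list[int]: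
--     # For each harmony level, solve 2*u + 5*(totalCycles-u) + hp == speakerScore
--     # linearly for u instead of scanning all cycle splits.
--     for harmony in range(climbing + 1):
--         hp = 0 if harmony == 0 else (harmony - 1) * 2
--         need = 5 * totalCycles + hp - speakerScore
--         if need % 3 == 0 and 0 <= need // 3 <= totalCycles:
--             u = need // 3
--             return [u * 2, (totalCycles - u) * 5, hp]
--     return None
-- ===== Notes on version B (the rewrite author's own statement) =====
-- stated objective: faster
-- what changed: The inner scan over all totalCycles+1 cycle splits is replaced by solving the linear equation 2u+5(totalCycles-u)+hp=speakerScore for u directly with a divisibility and range check, one O(1) step per harmony level.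
import Mathlib
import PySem

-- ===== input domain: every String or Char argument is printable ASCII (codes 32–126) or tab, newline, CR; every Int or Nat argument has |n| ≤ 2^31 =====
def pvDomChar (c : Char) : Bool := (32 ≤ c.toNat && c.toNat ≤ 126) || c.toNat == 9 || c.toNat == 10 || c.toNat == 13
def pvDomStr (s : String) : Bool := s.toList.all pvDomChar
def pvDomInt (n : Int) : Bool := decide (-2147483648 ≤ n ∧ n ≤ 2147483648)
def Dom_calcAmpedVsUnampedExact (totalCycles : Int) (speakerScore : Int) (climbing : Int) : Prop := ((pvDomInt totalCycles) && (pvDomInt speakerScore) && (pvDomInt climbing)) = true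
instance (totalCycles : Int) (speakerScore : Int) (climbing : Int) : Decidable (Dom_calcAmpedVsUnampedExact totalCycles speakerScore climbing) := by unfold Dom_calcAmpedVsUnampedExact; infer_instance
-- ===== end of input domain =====

-- B replaces A's inner scan over all cycle splits by solving the linear equation for
-- the unamped count directly (divisibility + range check): O(climbing) instead of
-- O(climbing * totalCycles).

-- ===== PORT A =====
-- inner 'for unamped in range(totalCycles + 1)' loop; a `return` propagates as `some`
def pvInnerA (totalCycles speakerScore harmony_points : Int) : List Int → Option (List Int)
  | [] => none
  | unamped :: rest =>
    let amped := totalCycles - unamped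
    if unamped * 2 + amped * 5 + harmony_points == speakerScore then
      some [unamped * 2, amped * 5, harmony_points]
    else pvInnerA totalCycles speakerScore harmony_points rest

-- outer 'for harmony in range(climbing + 1)' loop
def pvOuterA (totalCycles speakerScore : Int) : List Int → Option (List Int)
  | [] => none
  | harmony :: rest =>
    let harmony_points := if harmony == 0 then 0 else (harmony - 1) * 2
    match pvInnerA totalCycles speakerScore harmony_points (PySem.List.pyRange 0 (totalCycles + 1) 1) with
    | some r => some r
    | none => pvOuterA totalCycles speakerScore rest

def calcAmpedVsUnampedExact (totalCycles : Int) (speakerScore : Int) (climbing : Int) : Option (List Int) :=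
  pvOuterA totalCycles speakerScore (PySem.List.pyRange 0 (climbing + 1) 1)

-- ===== PORT B =====
-- single loop over harmony levels; u solved from 2u + 5(T-u) + hp = S
def pvLoopB (totalCycles speakerScore : Int) : List Int → Option (List Int)
  | [] => none
  | harmony :: rest =>
    let hp := if harmony == 0 then 0 else (harmony - 1) * 2
    let need := 5 * totalCycles + hp - speakerScore
    if PySem.Int.mod need 3 = 0 ∧ 0 ≤ PySem.Int.floordiv need 3 ∧ PySem.Int.floordiv need 3 ≤ totalCycles then
      let u := PySem.Int.floordiv need 3
      some [u * 2, (totalCycles - u) * 5, hp]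
    else pvLoopB totalCycles speakerScore rest

def calcAmpedVsUnampedExact_alt (totalCycles : Int) (speakerScore : Int) (climbing : Int) : Option (List Int) :=
  pvLoopB totalCycles speakerScore (PySem.List.pyRange 0 (climbing + 1) 1)

-- ===== PRECONDITION & SPEC =====
def Spec_calcAmpedVsUnampedExact (totalCycles : Int) (speakerScore : Int) (climbing : Int) (out : Option (List Int)) : Prop := out = calcAmpedVsUnampedExact_alt totalCycles speakerScore climbing
instance (totalCycles : Int) (speakerScore : Int) (climbing : Int) (out : Option (List Int)) : Decidable (Spec_calcAmpedVsUnampedExact totalCycles speakerScore climbing out) := by unfold Spec_calcAmpedVsUnampedExact; infer_instance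

-- ===== CLAIM (what is proved, stated in full; the proofs are below) =====
def Claim_equal_calcAmpedVsUnampedExact : Prop := ∀ (totalCycles : Int) (speakerScore : Int) (climbing : Int), Dom_calcAmpedVsUnampedExact totalCycles speakerScore climbing → Spec_calcAmpedVsUnampedExact totalCycles speakerScore climbing (calcAmpedVsUnampedExact totalCycles speakerScore climbing)

-- ===== LEMMAS AND PROOFS =====

-- A's inner scan starting at `a` finds exactly the solution u = need/3 when it is
-- divisible and in [a, T].
lemma pvInnerA_eq (T S hp : Int) : ∀ (n : Nat) (a : Int), (T + 1 - a).toNat = n →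
    pvInnerA T S hp (PySem.List.pyRange a (T + 1) 1) =
      (if (5 * T + hp - S) % 3 = 0 ∧ a ≤ (5 * T + hp - S) / 3 ∧ (5 * T + hp - S) / 3 ≤ T then
        some [(5 * T + hp - S) / 3 * 2, (T - (5 * T + hp - S) / 3) * 5, hp]
      else none) := by
  intro n
  induction n with
  | zero =>
    intro a ha
    rw [PySem.List.pyRange_one_eq_nil (by omega)]
    simp [pvInnerA]
    omega
  | succ k ih =>
    intro a ha
    rw [PySem.List.pyRange_one_cons (by omega)]
    simp only [pvInnerA, beq_iff_eq]
    by_cases h : a * 2 + (T - a) * 5 + hp = S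
    · have h3 : (5 * T + hp - S) = 3 * a := by omega
      rw [if_pos h, h3]
      have hdiv : (3 * a) / 3 = a := by omega
      rw [if_pos ⟨by omega, by rw [hdiv], by rw [hdiv]; omega⟩, hdiv]
    · rw [if_neg h, ih (a + 1) (by omega)]
      have hne : ¬ (5 * T + hp - S = 3 * a) := by omega
      refine if_congr ?_ rfl rfl
      constructor <;> intro ⟨h1, h2, h3⟩ <;> exact ⟨h1, by omega, h3⟩

lemma pvOuterA_eq_pvLoopB (T S : Int) (hs : List Int) :
    pvOuterA T S hs = pvLoopB T S hs := by
  induction hs with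
  | nil => rfl
  | cons h rest ih =>
    simp only [pvOuterA, pvLoopB]
    rw [pvInnerA_eq T S _ (T + 1 - 0).toNat 0 rfl]
    have hm : PySem.Int.mod (5 * T + (if h == 0 then 0 else (h - 1) * 2) - S) 3
        = (5 * T + (if h == 0 then 0 else (h - 1) * 2) - S) % 3 :=
      PySem.Int.mod_eq_emod_of_pos (by norm_num)
    have hd : PySem.Int.floordiv (5 * T + (if h == 0 then 0 else (h - 1) * 2) - S) 3
        = (5 * T + (if h == 0 then 0 else (h - 1) * 2) - S) / 3 :=
      PySem.Int.floordiv_eq_ediv_of_pos (by norm_num)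
    rw [hm, hd]
    split_ifs <;> first | rfl | exact ih

-- ===== VERDICT (by name: the statement is the Claim_ definition above) =====
theorem calcAmpedVsUnampedExact_spec : Claim_equal_calcAmpedVsUnampedExact := by
  intro T S C _
  unfold Spec_calcAmpedVsUnampedExact calcAmpedVsUnampedExact calcAmpedVsUnampedExact_alt
  exact pvOuterA_eq_pvLoopB T S _
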